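-- pv_equiv track=rewrite | github.com/PhilHarnish/forge | src/data/seek/node.py | _char_masks
-- ===== SOURCE A (Python) =====
-- from typing import Dict, ItemsView, List, Optional
--
-- def _char_masks(s: str) -> List[int]:
--   result = [0]
--   acc = 0
--   for c in s[::-1]:
--     if c < 'a' or c > 'z':
--       raise IndexError('Trie2 cannot index %s' % c)
--     acc |= 2 ** (ord(c) - 97)  # ord('a') == 97.
--     result.append(acc)
--   return list(reversed(result))
-- ===== SOURCE B (Python) =====
-- def _char_masks(s):
--   if not s:
--     return [0]
--   return _cm_rec(s, 0, len(s))
--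
-- def _cm_rec(s, lo, hi):
--   # divide and conquer on the range [lo, hi), hi - lo >= 1
--   if hi - lo == 1:
--     c = s[lo]
--     if c < 'a' or c > 'z':
--       raise IndexError('Trie2 cannot index %s' % c)
--     return [1 << (ord(c) - 97), 0]
--   mid = (lo + hi) // 2
--   right = _cm_rec(s, mid, hi)   # right half first (rightmost char validated first, as in a reverse scan)
--   left = _cm_rec(s, lo, mid)
--   r0 = right[0]
--   return [x | r0 for x in left[:-1]] + right
-- ===== Notes on version B (the rewrite author's own statement) =====
-- stated objective: alternative
-- what changed: B computes the suffix-OR list by divide and conquer: it splits the string at the midpoint, recursively builds each half's suffix-OR list, and merges by OR-ing the right half's total mask into every left-half entry, instead of A's single linear right-to-left accumulator scan.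
import Mathlib
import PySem

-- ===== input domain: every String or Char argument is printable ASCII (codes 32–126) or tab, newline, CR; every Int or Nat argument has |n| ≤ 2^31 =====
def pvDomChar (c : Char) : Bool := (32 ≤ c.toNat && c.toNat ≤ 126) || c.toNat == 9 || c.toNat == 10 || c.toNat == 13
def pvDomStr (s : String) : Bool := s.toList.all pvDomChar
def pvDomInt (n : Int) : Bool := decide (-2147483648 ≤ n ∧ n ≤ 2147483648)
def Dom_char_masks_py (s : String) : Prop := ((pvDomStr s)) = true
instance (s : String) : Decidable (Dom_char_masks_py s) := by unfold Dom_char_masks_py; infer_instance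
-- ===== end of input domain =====

-- B replaces A's linear right-to-left accumulator scan by divide and conquer on string halves
-- (merge = OR the right half's total mask into every left-half entry); same result, different algorithm.

-- ===== PORT A =====
-- loop over s[::-1]: acc |= 2**(ord(c)-97); result.append(acc); on an invalid char Python raises
-- IndexError (those inputs are excluded by Pre_; the port returns the partial result there).
def chmALoop : List Char → Int → List Int → List Int
  | [], _, result => result.reverse
  | c :: rest, acc, result =>
      if c < 'a' ∨ 'z' < c then result.reverse
      else
        let acc2 := PySem.Int.bor acc ((2 : Int) ^ (c.toNat - 97))
        chmALoop rest acc2 (result ++ [acc2])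

def char_masks_py (s : String) : List Int :=
  chmALoop s.toList.reverse 0 [0]

-- ===== PORT B =====
-- _cm_rec(s, lo, hi) on the sublist cs = s[lo:hi]; base case one char (raise on invalid — excluded
-- by Pre_; the port returns [0] there), otherwise split at the midpoint, recurse on each half and
-- merge: [x | right[0] for x in left[:-1]] + right.
def chmRec (cs : List Char) : List Int :=
  if _h : cs.length ≤ 1 then
    match cs with
    | [] => [0]
    | c :: _ => if c < 'a' ∨ 'z' < c then [0] else [(1 : Int) <<< (c.toNat - 97), 0]
  else
    let mid := cs.length / 2
    let right := chmRec (cs.drop mid)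
    let left := chmRec (cs.take mid)
    left.dropLast.map (fun x => PySem.Int.bor x (right.getD 0 0)) ++ right
termination_by cs.length
decreasing_by
  · simp; omega
  · simp; omega

def char_masks_py_alt (s : String) : List Int :=
  if s.toList.isEmpty then [0] else chmRec s.toList

-- ===== PRECONDITION & SPEC =====
-- Pre_: every character is a lowercase letter a–z; on any other input Python A raises IndexError
-- (and B raises the same IndexError).
def Pre_char_masks_py (s : String) : Prop := (s.toList.all (fun c => decide ('a' ≤ c) && decide (c ≤ 'z'))) = true
instance (s : String) : Decidable (Pre_char_masks_py s) := by unfold Pre_char_masks_py; infer_instance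
def pvWitness_char_masks_py : String := "abc"

def Spec_char_masks_py (s : String) (out : List Int) : Prop := out = char_masks_py_alt s
instance (s : String) (out : List Int) : Decidable (Spec_char_masks_py s out) := by unfold Spec_char_masks_py; infer_instance

-- ===== CLAIM (what is proved, stated in full; the proofs are below) =====
def Claim_equal_char_masks_py : Prop := ∀ (s : String), Dom_char_masks_py s → Pre_char_masks_py s → Spec_char_masks_py s (char_masks_py s)

-- ===== LEMMAS AND PROOFS =====

-- the single-character mask
def chmMask (c : Char) : Int := (2 : Int) ^ (c.toNat - 97)

-- reference suffix-OR list: (chmF ds acc)[i] = OR of masks of ds[i:] ||| acc, trailing element acc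
def chmF : List Char → Int → List Int
  | [], acc => [acc]
  | c :: ds, acc => PySem.Int.bor (chmMask c) ((chmF ds acc).headD 0) :: chmF ds acc

theorem chmF_ne_nil (ds : List Char) (acc : Int) : chmF ds acc ≠ [] := by
  cases ds <;> simp [chmF]

theorem headD_append_of_ne_nil {xs ys : List Int} (h : xs ≠ []) (d : Int) :
    (xs ++ ys).headD d = xs.headD d := by
  cases xs
  · simp at h
  · simp

-- accumulator list of A's loop (the values appended, in order)
def chmG : List Char → Int → List Int
  | [], _ => []
  | c :: cs, acc =>
      let a2 := PySem.Int.bor acc (chmMask c)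
      a2 :: chmG cs a2

theorem chmALoop_eq_g (cs : List Char) (acc : Int) (result : List Int)
    (h : ∀ c ∈ cs, 'a' ≤ c ∧ c ≤ 'z') :
    chmALoop cs acc result = (result ++ chmG cs acc).reverse := by
  induction cs generalizing acc result with
  | nil => simp [chmALoop, chmG]
  | cons c cs ih =>
      have hc := h c (by simp)
      have hnot : ¬(c < 'a' ∨ 'z' < c) := by
        rw [not_or, not_lt, not_lt]; exact hc
      simp only [chmALoop, hnot, if_false, chmG]
      rw [ih _ _ (fun d hd => h d (by simp [hd]))]
      simp [chmMask, List.append_assoc]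

theorem chmF_append (ds : List Char) (c : Char) (acc : Int) :
    chmF (ds ++ [c]) acc = chmF ds (PySem.Int.bor acc (chmMask c)) ++ [acc] := by
  induction ds with
  | nil => simp [chmF, PySem.Int.bor_comm]
  | cons d ds ih =>
      simp only [List.cons_append, chmF, ih]
      congr 1
      rw [headD_append_of_ne_nil (chmF_ne_nil ds (PySem.Int.bor acc (chmMask c)))]

theorem chmG_rev (cs : List Char) (acc : Int) :
    (chmG cs acc).reverse ++ [acc] = chmF cs.reverse acc := by
  induction cs generalizing acc with
  | nil => simp [chmG, chmF]
  | cons c cs ih =>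
      simp only [chmG, List.reverse_cons, chmF_append]
      rw [← ih (PySem.Int.bor acc (chmMask c))]

theorem char_masks_py_eq_F (s : String) (h : ∀ c ∈ s.toList, 'a' ≤ c ∧ c ≤ 'z') :
    char_masks_py s = chmF s.toList 0 := by
  unfold char_masks_py
  rw [chmALoop_eq_g _ _ _ (by intro c hc; exact h c (by simpa using hc))]
  have := chmG_rev s.toList.reverse 0
  simpa using this

-- threading an accumulator through chmF = OR-ing it onto every entry
theorem chmF_length (xs : List Char) (b : Int) : (chmF xs b).length = xs.length + 1 := by
  induction xs <;> simp [chmF, *]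

theorem dropLast_map_own (f : Int → Int) (l : List Int) :
    (l.map f).dropLast = l.dropLast.map f := by
  rw [List.dropLast_eq_take, List.dropLast_eq_take, ← List.map_take]
  simp

theorem chmMask_nonneg (c : Char) : 0 ≤ chmMask c := by
  unfold chmMask; positivity

theorem bor_nonneg (a b : Int) (ha : 0 ≤ a) (hb : 0 ≤ b) : 0 ≤ PySem.Int.bor a b := by
  rw [PySem.Int.bor_of_nonneg ha hb]
  exact Int.natCast_nonneg _

theorem bor_assoc_nn (a b c : Int) (ha : 0 ≤ a) (hb : 0 ≤ b) (hc : 0 ≤ c) :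
    PySem.Int.bor (PySem.Int.bor a b) c = PySem.Int.bor a (PySem.Int.bor b c) := by
  obtain ⟨m, rfl⟩ := Int.eq_ofNat_of_zero_le ha
  obtain ⟨n, rfl⟩ := Int.eq_ofNat_of_zero_le hb
  obtain ⟨k, rfl⟩ := Int.eq_ofNat_of_zero_le hc
  simp [PySem.Int.bor_natCast, Nat.lor_assoc]

theorem chmF_headD_nonneg (xs : List Char) (b : Int) (hb : 0 ≤ b) :
    0 ≤ (chmF xs b).headD 0 := by
  cases xs with
  | nil => simpa [chmF]
  | cons c cs =>
      simp only [chmF, List.headD_cons]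
      exact bor_nonneg _ _ (chmMask_nonneg c) (chmF_headD_nonneg cs b hb)

theorem chmF_acc (xs : List Char) (b : Int) (hb : 0 ≤ b) :
    chmF xs b = (chmF xs 0).map (fun x => PySem.Int.bor x b) := by
  induction xs with
  | nil =>
      simp only [chmF, List.map_cons, List.map_nil]
      rw [PySem.Int.bor_comm]
      simp
  | cons c xs ih =>
      simp only [chmF, ih, List.map_cons]
      congr 1
      cases h : chmF xs 0 with
      | nil => exact absurd h (chmF_ne_nil _ _)
      | cons y ys =>
          have hy : 0 ≤ y := by
            have := chmF_headD_nonneg xs 0 le_rfl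
            rw [h] at this; simpa using this
          simp only [List.map_cons, List.headD_cons]
          rw [bor_assoc_nn _ _ _ (chmMask_nonneg c) hy hb]

-- splitting chmF at an arbitrary point
theorem chmF_split (xs ys : List Char) :
    chmF (xs ++ ys) 0
      = (chmF xs ((chmF ys 0).headD 0)).dropLast ++ chmF ys 0 := by
  induction xs with
  | nil => simp [chmF]
  | cons c xs ih =>
      have hne : chmF xs ((chmF ys 0).headD 0) ≠ [] := chmF_ne_nil _ _
      simp only [List.cons_append, chmF, ih]
      rw [List.dropLast_cons_of_ne_nil hne, List.cons_append]
      congr 2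
      cases hx : chmF xs ((chmF ys 0).headD 0) with
      | nil => exact absurd hx hne
      | cons y t =>
          cases t with
          | nil =>
              have hlen := chmF_length xs ((chmF ys 0).headD 0)
              rw [hx] at hlen
              have hxs : xs = [] := by
                cases xs with
                | nil => rfl
                | cons d ds => simp at hlen
              subst hxs
              simp only [chmF, List.cons_eq_cons] at hx
              exact hx.1
          | cons z t' => simp

-- B's recursion computes the reference suffix-OR list on nonempty valid input
theorem chmRec_eq_F (n : Nat) : ∀ (cs : List Char), cs.length = n → cs ≠ [] →
    (∀ c ∈ cs, 'a' ≤ c ∧ c ≤ 'z') → chmRec cs = chmF cs 0 := by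
  induction n using Nat.strong_induction_on with
  | _ n ih =>
      intro cs hlen hne h
      rw [chmRec]
      by_cases h1 : cs.length ≤ 1
      · rw [dif_pos h1]
        match cs, hne with
        | c :: rest, _ =>
            have : rest = [] := by
              cases rest with
              | nil => rfl
              | cons d ds => simp at h1
            subst this
            have hc := h c (by simp)
            have hnot : ¬(c < 'a' ∨ 'z' < c) := by
              rw [not_or, not_lt, not_lt]; exact hc
            simp [hnot, chmF, chmMask, Int.shiftLeft_eq']
      · rw [dif_neg h1]
        have h2 : 2 ≤ cs.length := by omega
        have hmid1 : 1 ≤ cs.length / 2 := by omega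
        have hmid2 : cs.length / 2 < cs.length := by omega
        have htk : (cs.take (cs.length / 2)).length = cs.length / 2 := by
          simp; omega
        have hdr : (cs.drop (cs.length / 2)).length = cs.length - cs.length / 2 := by simp
        have htkne : cs.take (cs.length / 2) ≠ [] := by
          intro hx; rw [← List.length_eq_zero_iff] at hx; omega
        have hdrne : cs.drop (cs.length / 2) ≠ [] := by
          intro hx; rw [← List.length_eq_zero_iff] at hx; omega
        have hL := ih (cs.length / 2) (by omega) (cs.take (cs.length / 2)) htk htkne
          (fun c hc => h c (List.mem_of_mem_take hc))
        have hR := ih (cs.length - cs.length / 2) (by omega) (cs.drop (cs.length / 2)) hdr hdrne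
          (fun c hc => h c (List.mem_of_mem_drop hc))
        simp only [hL, hR]
        have hsplit := chmF_split (cs.take (cs.length / 2)) (cs.drop (cs.length / 2))
        rw [List.take_append_drop] at hsplit
        rw [hsplit, chmF_acc (cs.take (cs.length / 2)) _ (chmF_headD_nonneg _ 0 le_rfl)]
        have hget : (chmF (cs.drop (cs.length / 2)) 0).getD 0 0
            = (chmF (cs.drop (cs.length / 2)) 0).headD 0 := by
          cases hx : chmF (cs.drop (cs.length / 2)) 0 with
          | nil => exact absurd hx (chmF_ne_nil _ _)
          | cons y ys => simp
        rw [hget, dropLast_map_own]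

theorem char_masks_py_alt_eq_F (s : String) (h : ∀ c ∈ s.toList, 'a' ≤ c ∧ c ≤ 'z') :
    char_masks_py_alt s = chmF s.toList 0 := by
  unfold char_masks_py_alt
  by_cases hne : s.toList = []
  · simp [hne, chmF]
  · rw [if_neg (by simpa using hne)]
    exact chmRec_eq_F s.toList.length s.toList rfl hne h

-- ===== VERDICT (by name: the statement is the Claim_ definition above) =====
theorem char_masks_py_spec : Claim_equal_char_masks_py := by
  intro s _ hpre
  have h : ∀ c ∈ s.toList, 'a' ≤ c ∧ c ≤ 'z' := by
    intro c hc
    have := List.all_eq_true.mp hpre c hc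
    simpa using this
  unfold Spec_char_masks_py
  rw [char_masks_py_eq_F s h, char_masks_py_alt_eq_F s h]
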